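-- pv_equiv track=rewrite | github.com/MarkSon-42/CodingTest_Python | programmersBasicTraining/문자열/문자열 묶기.py | solution
-- ===== SOURCE A (Python) =====
-- def solution(strArr):
--     group_counts = {}
--     for word in strArr:
--         length = len(word)
--         if length in group_counts:
--             group_counts[length] += 1
--         else:
--             group_counts[length] = 1
--     max_count = max(group_counts.values())
--     return max_count
-- ===== SOURCE B (Python) =====
-- def solution(strArr):
--     lengths = sorted(len(w) for w in strArr)
--     best = 0
--     run = 0
--     prev = None
--     for n in lengths:
--         run = run + 1 if n == prev else 1
--         prev = n
--         best = max(best, run)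
--     return best
-- ===== Notes on version B (the rewrite author's own statement) =====
-- stated objective: alternative
-- what changed: Replaces the dict-of-counts plus max-over-values with sorting the word lengths and a single run-length scan over the sorted list that keeps the longest run of equal lengths.
import Mathlib
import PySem

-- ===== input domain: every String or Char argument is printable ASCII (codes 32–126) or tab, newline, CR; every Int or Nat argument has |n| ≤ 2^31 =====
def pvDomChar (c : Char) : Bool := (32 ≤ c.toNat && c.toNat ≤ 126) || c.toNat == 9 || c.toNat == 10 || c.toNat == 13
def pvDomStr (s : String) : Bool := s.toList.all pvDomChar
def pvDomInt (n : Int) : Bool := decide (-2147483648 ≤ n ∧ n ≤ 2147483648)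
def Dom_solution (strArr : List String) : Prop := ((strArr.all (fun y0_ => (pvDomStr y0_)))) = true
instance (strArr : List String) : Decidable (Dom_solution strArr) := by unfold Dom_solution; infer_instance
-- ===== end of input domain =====

-- B sorts the word lengths and finds the longest run of equal values in one scan, instead of A's dict of counts (alternative algorithm; the empty list, where A raises ValueError, is excluded by Pre_).


-- ===== PORT A =====
def solution (strArr : List String) : Int :=
  let group_counts : PySem.Dict Int Int :=
    strArr.foldl (fun d word =>
      let length : Int := PySem.Str.len word
      if d.contains length then d.insert length (d.getD length 0 + 1)
      else d.insert length 1) PySem.Dict.empty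
  -- max(group_counts.values()); raises ValueError on empty dict, excluded by Pre_
  (PySem.List.max? group_counts.values (fun x => x)).getD 0

-- ===== PORT B =====
-- the body of B's for-loop: state is (best, run, prev)
def pvStep (s : Int × Int × Option Int) (n : Int) : Int × Int × Option Int :=
  let run : Int := if s.2.2 = some n then s.2.1 + 1 else 1
  (max s.1 run, run, some n)

def solution_alt (strArr : List String) : Int :=
  let lengths : List Int :=
    PySem.List.sorted (strArr.map (fun w => PySem.Str.len w)) (fun x => x) false
  (lengths.foldl pvStep (0, 0, none)).1

-- ===== PRECONDITION & SPEC =====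
-- Pre_ excludes only the empty list, on which Python A (max of an empty sequence) raises ValueError.
def Pre_solution (strArr : List String) : Prop := strArr ≠ []
instance (strArr : List String) : Decidable (Pre_solution strArr) := by unfold Pre_solution; infer_instance
def pvWitness_solution : List String := (["ab", "c"])

def Spec_solution (strArr : List String) (out : Int) : Prop := out = solution_alt strArr
instance (strArr : List String) (out : Int) : Decidable (Spec_solution strArr out) := by unfold Spec_solution; infer_instance

-- ===== CLAIM (what is proved, stated in full; the proofs are below) =====
def Claim_equal_solution : Prop := ∀ (strArr : List String), Dom_solution strArr → Pre_solution strArr → Spec_solution strArr (solution strArr)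

-- ===== LEMMAS AND PROOFS =====

-- the maximum group size: max over the distinct values of l of their multiplicity
def pvM (l : List Int) : Int :=
  ((PySem.List.dedup l).map (fun n => (l.count n : Int))).foldl max 0

lemma foldl_max_le_iff (ys : List Int) (a b : Int) :
    ys.foldl max a ≤ b ↔ a ≤ b ∧ ∀ y ∈ ys, y ≤ b := by
  induction ys generalizing a with
  | nil => simp
  | cons y t ih =>
    simp only [List.foldl_cons, ih, max_le_iff, List.mem_cons]
    constructor
    · rintro ⟨⟨h1, h2⟩, h3⟩
      exact ⟨h1, fun z hz => hz.elim (fun e => e ▸ h2) (h3 z)⟩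
    · rintro ⟨h1, h2⟩
      exact ⟨⟨h1, h2 y (Or.inl rfl)⟩, fun z hz => h2 z (Or.inr hz)⟩

lemma mem_le_foldl_max (ys : List Int) (a y : Int) (hy : y ∈ ys) : y ≤ ys.foldl max a :=
  ((foldl_max_le_iff ys a _).mp le_rfl).2 y hy

lemma foldl_max_choice (ys : List Int) (a : Int) :
    ys.foldl max a = a ∨ ys.foldl max a ∈ ys := by
  induction ys generalizing a with
  | nil => exact Or.inl rfl
  | cons y t ih =>
    simp only [List.foldl_cons]
    rcases ih (max a y) with h | h
    · rw [h]
      rcases le_total a y with hle | hle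
      · exact Or.inr (by simp [max_eq_right hle])
      · exact Or.inl (max_eq_left hle)
    · exact Or.inr (List.mem_cons_of_mem _ h)

lemma pvM_ub (l : List Int) (y : Int) (hy : y ∈ l) : (l.count y : Int) ≤ pvM l := by
  apply mem_le_foldl_max
  exact List.mem_map_of_mem ((PySem.List.mem_dedup _ _).mpr hy)

lemma pvM_attained (l : List Int) (hne : l ≠ []) : ∃ y ∈ l, pvM l = (l.count y : Int) := by
  rcases foldl_max_choice ((PySem.List.dedup l).map (fun n => (l.count n : Int))) 0 with h | h
  · exfalso
    rcases List.exists_cons_of_ne_nil hne with ⟨z, zs, rfl⟩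
    have h1 : ((z :: zs).count z : Int) ≤ pvM (z :: zs) := pvM_ub _ z (List.mem_cons_self)
    have h2 : 0 < (z :: zs).count z := List.count_pos_iff.mpr List.mem_cons_self
    have : pvM (z :: zs) = 0 := h
    omega
  · rcases List.mem_map.mp h with ⟨y, hy, hval⟩
    exact ⟨y, (PySem.List.mem_dedup _ _).mp hy, hval.symm⟩

lemma pvM_eq (l : List Int) (k : Int) (hne : l ≠ [])
    (ub : ∀ y ∈ l, (l.count y : Int) ≤ k) (att : ∃ y ∈ l, k = (l.count y : Int)) :
    pvM l = k := by
  rcases att with ⟨y, hy, rfl⟩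
  rcases pvM_attained l hne with ⟨z, hz, hzv⟩
  have h1 := pvM_ub l y hy
  have h2 := ub z hz
  omega

-- invariant of B's scan on a sorted list: best is the max group size,
-- run is the multiplicity of the last element, prev is the last element
lemma run_scan (l : List Int) (hs : l.Pairwise (· ≤ ·)) (hne : l ≠ []) :
    l.foldl pvStep (0, 0, none) =
      (pvM l, (l.count (l.getLast hne) : Int), some (l.getLast hne)) ∧
      ∀ y ∈ l, y ≤ l.getLast hne := by
  induction l using List.reverseRecOn with
  | nil => exact absurd rfl hne
  | append_singleton l x ih =>
    rw [List.pairwise_append] at hs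
    obtain ⟨hsl, -, hlx⟩ := hs
    have hlast : (l ++ [x]).getLast (by simp) = x := by
      simp [List.getLast_append_of_ne_nil]
    rcases eq_or_ne l [] with rfl | hlne
    · refine ⟨?_, ?_⟩
      · simp only [List.nil_append, List.foldl_cons, List.foldl_nil, pvStep]
        have : pvM [x] = 1 := by
          apply pvM_eq _ _ (by simp) (by simp) ⟨x, by simp⟩
        simp [this]
      · intro y hy
        simp only [List.nil_append, List.mem_singleton] at hy
        simp [hy]
    · obtain ⟨hfold, hle⟩ := ih hsl hlne
      set t := l.getLast hlne with ht
      have htl : t ∈ l := List.getLast_mem hlne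
      have htx : t ≤ x := hlx t htl x (List.mem_singleton_self x)
      have hcnt' : ((l ++ [x]).count x : Int) = (l.count x : Int) + 1 := by
        simp [List.count_append]
      have hrun : pvStep (pvM l, (l.count t : Int), some t) x =
          (max (pvM l) ((l ++ [x]).count x : Int), ((l ++ [x]).count x : Int), some x) := by
        rcases eq_or_ne t x with rfl | htne
        · simp [pvStep]
        · have hxnl : x ∉ l := fun hx => absurd (hle x hx) (by omega)
          have : l.count x = 0 := List.count_eq_zero.mpr hxnl
          simp [pvStep, htne, this]
      have hM : pvM (l ++ [x]) = max (pvM l) (((l ++ [x]).count x : Int)) := by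
        apply pvM_eq _ _ (by simp)
        · intro y hy
          rcases List.mem_append.mp hy with hyl | hyx
          · rcases eq_or_ne y x with rfl | hyne
            · exact le_max_right _ _
            · have : (l ++ [x]).count y = l.count y := by
                simp [List.count_append, Ne.symm hyne]
              rw [this]
              exact le_trans (pvM_ub l y hyl) (le_max_left _ _)
          · rw [List.mem_singleton.mp hyx]
            exact le_max_right _ _
        · rcases le_total (pvM l) (((l ++ [x]).count x : Int)) with hc | hc
          · exact ⟨x, by simp, max_eq_right hc⟩
          · rcases pvM_attained l hlne with ⟨y, hyl, hyv⟩
            have hyne : y ≠ x := by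
              rintro rfl
              have := pvM_ub l y hyl
              omega
            refine ⟨y, List.mem_append_left _ hyl, ?_⟩
            have : (l ++ [x]).count y = l.count y := by
              simp [List.count_append, Ne.symm hyne]
            rw [max_eq_left hc, this, hyv]
      refine ⟨?_, ?_⟩
      · rw [List.foldl_append, hfold]
        simp only [List.foldl_cons, List.foldl_nil]
        rw [hrun, hM, hlast]
      · intro y hy
        rw [hlast]
        rcases List.mem_append.mp hy with hyl | hyx
        · exact le_trans (hle y hyl) htx
        · exact le_of_eq (List.mem_singleton.mp hyx)

-- pvM only depends on the multiset of elements
lemma pvM_perm (l l' : List Int) (hp : l.Perm l') (hne : l ≠ []) : pvM l' = pvM l := by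
  have hne' : l' ≠ [] := by
    intro h
    exact hne (List.eq_nil_of_length_eq_zero (by rw [hp.length_eq, h]; rfl))
  apply pvM_eq l' (pvM l) hne'
  · intro y hy
    rw [← hp.count_eq]
    exact pvM_ub l y (hp.mem_iff.mpr hy)
  · rcases pvM_attained l hne with ⟨y, hy, hyv⟩
    exact ⟨y, hp.mem_iff.mp hy, by rw [hyv, hp.count_eq]⟩

-- A's counting loop builds exactly Counter(lengths)
lemma solution_dict_eq_counter (strArr : List String) :
    strArr.foldl (fun d word =>
      let length : Int := PySem.Str.len word
      if d.contains length then d.insert length (d.getD length 0 + 1)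
      else d.insert length 1) PySem.Dict.empty
    = PySem.Dict.counter (strArr.map (fun w => PySem.Str.len w)) := by
  rw [← List.foldl_map (f := fun w => (PySem.Str.len w : Int))
      (g := fun (d : PySem.Dict Int Int) x =>
        if d.contains x then d.insert x (d.getD x 0 + 1) else d.insert x 1)]
  rw [← PySem.Dict.foldl_insert_getD_add_one_eq_counter]
  apply PySem.List.foldl_congr_mem
  intro d x _
  by_cases hc : d.contains x = true
  · simp [hc]
  · rw [if_neg hc]
    have h0 : d.getD x 0 = 0 := PySem.Dict.getD_of_not_contains (h := by simpa using hc) ..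
    rw [h0]
    norm_num

-- A's result is pvM of the length list
lemma solution_eq_pvM (strArr : List String) (hne : strArr ≠ []) :
    solution strArr = pvM (strArr.map (fun w => PySem.Str.len w)) := by
  set L := strArr.map (fun w => PySem.Str.len w) with hL
  have hLne : L ≠ [] := by simp [hL, hne]
  show (PySem.List.max? (strArr.foldl (fun d word =>
      let length : Int := PySem.Str.len word
      if d.contains length then d.insert length (d.getD length 0 + 1)
      else d.insert length 1) PySem.Dict.empty).values (fun x => x)).getD 0 = pvM L
  rw [solution_dict_eq_counter]
  have hv : (PySem.Dict.counter L).values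
      = ((PySem.Dict.counter L).items).map (·.2) := rfl
  rw [hv, PySem.Dict.items_counter, List.map_map]
  have hdne : PySem.List.dedup L ≠ [] := by
    rcases List.exists_cons_of_ne_nil hLne with ⟨z, zs, hz⟩
    intro h
    have : z ∈ PySem.List.dedup L := (PySem.List.mem_dedup _ _).mpr (by rw [hz]; exact List.mem_cons_self)
    rw [h] at this
    exact absurd this (List.not_mem_nil)
  rcases List.exists_cons_of_ne_nil hdne with ⟨c, cs, hd⟩
  rw [← PySem.List.dedup_eq_ofList, hd]
  simp only [List.map_cons, PySem.List.max?_id_cons, Option.getD_some]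
  have hcL : c ∈ L := (PySem.List.mem_dedup _ _).mp (hd ▸ List.mem_cons_self)
  have hc1 : (1 : Int) ≤ (L.count c : Int) := by
    have := List.count_pos_iff.mpr hcL
    omega
  unfold pvM
  rw [hd]
  simp only [List.map_cons, List.foldl_cons, Function.comp]
  rw [max_eq_right (by omega : (0:Int) ≤ (L.count c : Int))]
  rfl

-- ===== VERDICT (by name: the statement is the Claim_ definition above) =====
theorem solution_spec : Claim_equal_solution := by
  intro strArr _ hne
  show solution strArr = solution_alt strArr
  set L := strArr.map (fun w => PySem.Str.len w) with hL
  have hLne : L ≠ [] := by simp only [hL, ne_eq, List.map_eq_nil_iff]; exact hne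
  have hsne : PySem.List.sorted L (fun x => x) false ≠ [] := by
    simpa [PySem.List.sorted_eq_nil_iff] using hLne
  have hpair : (PySem.List.sorted L (fun x => x) false).Pairwise (· ≤ ·) :=
    PySem.List.sorted_pairwise ..
  obtain ⟨hfold, -⟩ := run_scan _ hpair hsne
  show solution strArr = (( PySem.List.sorted L (fun x => x) false).foldl pvStep (0, 0, none)).1
  rw [hfold]
  show solution strArr = pvM (PySem.List.sorted L (fun x => x) false)
  rw [pvM_perm L _ (PySem.List.sorted_perm ..).symm hLne]
  exact solution_eq_pvM strArr hne
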